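-- pv_equiv track=rewrite | github.com/aws-solutions-library-samples/guidance-for-medialake-on-aws | lambdas/nodes/video_proxy_and_thumbnail/audio_track_selection.py | _is_condition_shadowed
-- ===== SOURCE A (Python) =====
-- def _is_condition_shadowed(candidate: dict, prior_conditions: list[dict]) -> bool:
--     """Return True if candidate condition is fully covered by prior conditions.
--
--     A condition is shadowed when every integer that could match it would also
--     match at least one earlier condition. Uses interval arithmetic:
--     - {"exact": N}       → interval [N, N]
--     - {"min": M, "max": N} → interval [M, N]
--     - {"min": M}         → interval [M, ∞)
--
--     For a single prior condition, checks if it fully contains the candidate.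
--     For multiple prior conditions, checks if their union covers the candidate.
--
--     Args:
--         candidate: The condition dict to check.
--         prior_conditions: List of earlier condition dicts.
--
--     Returns:
--         True if the candidate is fully shadowed by the prior conditions.
--     """
--     # Represent ∞ as a large sentinel
--     INF = float("inf")
--
--     def to_interval(cond: dict) -> tuple[int | float, int | float]:
--         if "exact" in cond:
--             n = cond["exact"]
--             return (n, n)
--         min_val = cond["min"]
--         max_val = cond.get("max", INF)
--         return (min_val, max_val)
--
--     cand_lo, cand_hi = to_interval(candidate)
--
--     # Build list of prior intervals
--     prior_intervals = [to_interval(c) for c in prior_conditions]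
--
--     # Check if the union of prior intervals covers [cand_lo, cand_hi]
--     # Strategy: sweep from cand_lo to cand_hi, checking coverage
--     # Sort intervals by start point
--     relevant = [
--         (lo, hi) for lo, hi in prior_intervals if lo <= cand_hi and hi >= cand_lo
--     ]
--     if not relevant:
--         return False
--
--     relevant.sort(key=lambda x: x[0])
--
--     # Check if the union of relevant intervals covers [cand_lo, cand_hi]
--     covered_up_to = (
--         cand_lo - 1
--     )  # last integer we've confirmed is covered (exclusive start)
--
--     for lo, hi in relevant:
--         if lo > covered_up_to + 1:
--             # There's a gap between covered_up_to and lo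
--             return False
--         # Extend coverage
--         if hi == INF:
--             covered_up_to = INF
--             break
--         covered_up_to = max(covered_up_to, hi)
--
--     # Check if we've covered up to cand_hi
--     if cand_hi == INF:
--         return covered_up_to == INF
--     return covered_up_to >= cand_hi
-- ===== SOURCE B (Python) =====
-- def _is_condition_shadowed(candidate: dict, prior_conditions: list[dict]) -> bool:
--     """Greedy point-advancing cover: no sorting; repeatedly extend the covered
--     reach by the best currently-reachable interval, discarding used intervals."""
--     INF = float("inf")
--
--     def to_interval(cond):
--         if "exact" in cond:
--             n = cond["exact"]
--             return (n, n)
--         return (cond["min"], cond.get("max", INF))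
--
--     cand_lo, cand_hi = to_interval(candidate)
--     rel = [
--         iv
--         for iv in map(to_interval, prior_conditions)
--         if iv[0] <= cand_hi and iv[1] >= cand_lo
--     ]
--     if not rel:
--         return False
--
--     reach = cand_lo - 1
--     while rel:
--         if cand_hi != INF and reach >= cand_hi:
--             return True
--         eligible = [hi for lo, hi in rel if lo <= reach + 1]
--         if not eligible:
--             return False
--         best = max(eligible)
--         if best <= reach:
--             return False
--         if best == INF:
--             return True
--         rel = [iv for iv in rel if iv[0] > reach + 1]
--         reach = best
--     return cand_hi != INF and reach >= cand_hi
-- ===== Notes on version B (the rewrite author's own statement) =====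
-- stated objective: alternative
-- what changed: Replaces A's sort-then-single-sweep coverage check with an unsorted greedy point-advancing cover that repeatedly extends the covered reach by the maximum reachable endpoint and discards consumed intervals; no sort is performed.
import Mathlib
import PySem

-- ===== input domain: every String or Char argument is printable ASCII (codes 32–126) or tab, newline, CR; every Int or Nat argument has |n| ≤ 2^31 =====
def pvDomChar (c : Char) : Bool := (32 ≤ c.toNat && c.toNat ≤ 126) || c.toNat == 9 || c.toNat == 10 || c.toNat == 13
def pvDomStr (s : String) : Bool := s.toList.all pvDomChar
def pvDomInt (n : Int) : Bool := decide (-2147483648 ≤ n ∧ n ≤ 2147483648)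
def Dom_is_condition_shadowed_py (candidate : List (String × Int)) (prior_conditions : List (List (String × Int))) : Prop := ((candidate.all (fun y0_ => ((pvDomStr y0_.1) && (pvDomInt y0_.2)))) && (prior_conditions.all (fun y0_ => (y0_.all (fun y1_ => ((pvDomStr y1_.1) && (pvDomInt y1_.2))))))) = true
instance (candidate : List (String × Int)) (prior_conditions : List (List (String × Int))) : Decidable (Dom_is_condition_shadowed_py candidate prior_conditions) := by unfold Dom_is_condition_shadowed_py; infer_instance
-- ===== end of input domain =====

-- B replaces A's sort-then-single-sweep coverage check by an unsorted greedy point-advancing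
-- cover (alternative decomposition; no speed claim). Intervals are (lo, hi) with hi = none
-- encoding Python's INF sentinel.

-- ===== PORT A =====

-- first-match association-list lookup (the convention's dict lookup)
def pvLookup (c : List (String × Int)) (k : String) : Option Int :=
  match c with
  | [] => none
  | (k', v) :: t => if k' == k then some v else pvLookup t k

-- to_interval: {"exact": n} → (n, some n); else (cond["min"], cond.get("max")); none = KeyError
def toInterval? (cond : List (String × Int)) : Option (Int × Option Int) :=
  match pvLookup cond "exact" with
  | some n => some (n, some n)
  | none =>
    match pvLookup cond "min" with
    | some m => some (m, pvLookup cond "max")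
    | none => none

-- x ≤ h in the extended order (none = +∞); used for both relevance comparisons
def leE (x : Int) (h : Option Int) : Bool :=
  match h with
  | none => true
  | some v => decide (x ≤ v)

-- A's loop over the sorted relevant intervals; result: none = returned False at a gap,
-- some none = covered_up_to became INF (break), some (some c) = final finite covered_up_to
def sweepA : List (Int × Option Int) → Int → Option (Option Int)
  | [], c => some (some c)
  | (lo, hi) :: rest, c =>
    if c + 1 < lo then none
    else
      match hi with
      | none => some none
      | some h => sweepA rest (max c h)

def is_condition_shadowed_py (candidate : List (String × Int)) (prior_conditions : List (List (String × Int))) : Bool :=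
  match toInterval? candidate with
  | none => false
  | some (clo, chi) =>
    let prior_intervals := prior_conditions.filterMap toInterval?
    let relevant := prior_intervals.filter (fun iv => leE iv.1 chi && leE clo iv.2)
    if relevant.isEmpty then false
    else
      match sweepA (PySem.List.sorted relevant (fun iv => iv.1) false) (clo - 1) with
      | none => false
      | some none => true
      | some (some c) =>
        match chi with
        | none => false
        | some h => decide (h ≤ c)

-- ===== PORT B =====

-- hi > best in the extended order (none = +∞)
def eGt : Option Int → Option Int → Bool
  | none, none => false
  | none, some _ => true
  | some _, none => false
  | some a, some b => decide (b < a)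

-- "cand_hi != INF and reach >= cand_hi"
def coveredCheck (chi : Option Int) (reach : Int) : Bool :=
  match chi with
  | none => false
  | some h => decide (h ≤ reach)

-- cited by greedyB's decreasing_by for termination
theorem filter_gt_length_lt {rel : List (Int × Option Int)} {r : Int}
    (h : (rel.filter (fun iv => decide (iv.1 ≤ r + 1))).map Prod.snd ≠ []) :
    (rel.filter (fun iv => decide (r + 1 < iv.1))).length < rel.length := by
  rw [List.length_filter_lt_length_iff_exists]
  rcases List.exists_mem_of_ne_nil _ h with ⟨x, hx⟩
  rcases List.mem_map.1 hx with ⟨iv, hiv, _⟩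
  rcases List.mem_filter.1 hiv with ⟨hmem, hle⟩
  exact ⟨iv, hmem, by simpa using hle⟩

-- B's while-loop: extend reach greedily by the best reachable endpoint, drop consumed intervals
def greedyB (chi : Option Int) (rel : List (Int × Option Int)) (reach : Int) : Bool :=
  if rel = [] then coveredCheck chi reach
  else if coveredCheck chi reach then true
  else
    match hel : (rel.filter (fun iv => decide (iv.1 ≤ reach + 1))).map Prod.snd with
    | [] => false
    | e :: es =>
      match es.foldl (fun m v => if eGt v m then v else m) e with
      | none => true
      | some b =>
        if b ≤ reach then false
        else greedyB chi (rel.filter (fun iv => decide (reach + 1 < iv.1))) b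
  termination_by rel.length
  decreasing_by
    rw [List.length_unattach, List.filter_attach rel (fun iv => decide (reach + 1 < iv.1))]
    rw [List.length_map, List.length_attach]
    exact filter_gt_length_lt (by rw [hel]; exact List.cons_ne_nil _ _)

def is_condition_shadowed_py_alt (candidate : List (String × Int)) (prior_conditions : List (List (String × Int))) : Bool :=
  match toInterval? candidate with
  | none => false
  | some (clo, chi) =>
    let rel := (prior_conditions.filterMap toInterval?).filter (fun iv => leE iv.1 chi && leE clo iv.2)
    if rel.isEmpty then false
    else greedyB chi rel (clo - 1)


-- ===== PRECONDITION & SPEC =====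

-- Pre_ excludes exactly the inputs on which the Python A raises KeyError: a condition dict
-- (candidate or prior) that has neither an "exact" nor a "min" key.
def Pre_is_condition_shadowed_py (candidate : List (String × Int)) (prior_conditions : List (List (String × Int))) : Prop :=
  ("exact" ∈ candidate.map Prod.fst ∨ "min" ∈ candidate.map Prod.fst) ∧
  ∀ c ∈ prior_conditions, "exact" ∈ c.map Prod.fst ∨ "min" ∈ c.map Prod.fst

instance (candidate : List (String × Int)) (prior_conditions : List (List (String × Int))) : Decidable (Pre_is_condition_shadowed_py candidate prior_conditions) := by unfold Pre_is_condition_shadowed_py; infer_instance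

def pvWitness_is_condition_shadowed_py : (List (String × Int)) × (List (List (String × Int))) :=
  ([("min", 1), ("max", 5)], [[("exact", 1)], [("min", 2), ("max", 10)]])

def Spec_is_condition_shadowed_py (candidate : List (String × Int)) (prior_conditions : List (List (String × Int))) (out : Bool) : Prop := out = is_condition_shadowed_py_alt candidate prior_conditions
instance (candidate : List (String × Int)) (prior_conditions : List (List (String × Int))) (out : Bool) : Decidable (Spec_is_condition_shadowed_py candidate prior_conditions out) := by unfold Spec_is_condition_shadowed_py; infer_instance

-- ===== CLAIM (what is proved, stated in full; the proofs are below) =====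
def Claim_equal_is_condition_shadowed_py : Prop := ∀ (candidate : List (String × Int)) (prior_conditions : List (List (String × Int))), Dom_is_condition_shadowed_py candidate prior_conditions → Pre_is_condition_shadowed_py candidate prior_conditions → Spec_is_condition_shadowed_py candidate prior_conditions (is_condition_shadowed_py candidate prior_conditions)

-- ===== LEMMAS AND PROOFS =====

-- interval iv covers the integer point x
def covP (x : Int) (iv : Int × Option Int) : Prop := iv.1 ≤ x ∧ leE x iv.2 = true

-- the union of the intervals in s covers every integer point x with r < x ≤ chi
def coversFrom (s : List (Int × Option Int)) (r : Int) (chi : Option Int) : Prop :=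
  ∀ x : Int, r < x → leE x chi = true → ∃ iv ∈ s, covP x iv

theorem coversFrom_nil {r : Int} {chi : Option Int} :
    coversFrom [] r chi ↔ ∀ x : Int, r < x → leE x chi = true → False := by
  unfold coversFrom
  simp

theorem coveredCheck_iff (chi : Option Int) (r : Int) :
    coveredCheck chi r = true ↔ ∀ x : Int, r < x → leE x chi = true → False := by
  cases chi with
  | none =>
    constructor
    · intro h; simp [coveredCheck] at h
    · intro h; exact (h (r + 1) (by omega) (by simp [leE])).elim
  | some h =>
    simp only [coveredCheck, decide_eq_true_eq]
    constructor
    · intro hle x hx hxle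
      simp only [leE, decide_eq_true_eq] at hxle
      omega
    · intro hall; by_contra hlt
      exact hall (r + 1) (by omega) (by simp [leE]; omega)

-- value of an interval endpoint in WithTop Int (none = +∞)
def eV : Option Int → WithTop Int
  | none => ⊤
  | some a => (a : WithTop Int)

theorem eGt_iff {a b : Option Int} : eGt a b = true ↔ eV b < eV a := by
  cases a <;> cases b <;> simp [eGt, eV]

theorem leE_iff {x : Int} {h : Option Int} : leE x h = true ↔ (x : WithTop Int) ≤ eV h := by
  cases h <;> simp [leE, eV]

-- Python's max(eligible): the fold result is a member and an upper bound
theorem foldl_max_spec (e : Option Int) (es : List (Option Int)) :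
    (es.foldl (fun m v => if eGt v m then v else m) e) ∈ (e :: es) ∧
    ∀ v ∈ (e :: es), eV v ≤ eV (es.foldl (fun m v => if eGt v m then v else m) e) := by
  induction es generalizing e with
  | nil => exact ⟨by simp, by intro v hv; simp only [List.mem_singleton] at hv; subst hv; simp⟩
  | cons f fs ih =>
    simp only [List.foldl_cons]
    rcases ih (if eGt f e then f else e) with ⟨hmem, hmax⟩
    have hme : eV e ≤ eV (if eGt f e then f else e) := by
      split
      · exact le_of_lt (eGt_iff.1 (by assumption))
      · exact le_refl _
    have hmf : eV f ≤ eV (if eGt f e then f else e) := by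
      split
      · exact le_refl _
      · have : ¬ eV e < eV f := fun hc => by simp [eGt_iff.2 hc] at *
        exact le_of_not_gt (by simpa [eGt_iff] using (by assumption : ¬ eGt f e = true))
    have hmix : (if eGt f e then f else e) ∈ e :: f :: fs := by split <;> simp
    refine ⟨?_, ?_⟩
    · rcases List.mem_cons.1 hmem with hh | ht
      · rw [hh]; exact hmix
      · simp [ht]
    · intro v hv
      have hmtop := hmax (if eGt f e then f else e) (by simp)
      rcases List.mem_cons.1 hv with hh | hv'
      · subst hh; exact le_trans hme hmtop
      · rcases List.mem_cons.1 hv' with hh | hv''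
        · subst hh; exact le_trans hmf hmtop
        · exact hmax v (by simp [hv''])

-- A's sweep verdict on a key-sorted relevant list decides exactly the coverage predicate
theorem sweepA_iff (chi : Option Int) :
    ∀ (s : List (Int × Option Int)) (r : Int),
      s.Pairwise (fun a b => a.1 ≤ b.1) →
      (∀ iv ∈ s, leE iv.1 chi = true) →
      ((match sweepA s r with
        | none => false
        | some none => true
        | some (some c) => coveredCheck chi c) = true ↔ coversFrom s r chi) := by
  intro s
  induction s with
  | nil =>
    intro r _ _
    simp only [sweepA]
    rw [coveredCheck_iff, coversFrom_nil]
  | cons hd tl ih =>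
    rintro r hsort hrel
    obtain ⟨lo, hi⟩ := hd
    by_cases hgap : r + 1 < lo
    · -- gap: sweep returns none; x = r + 1 is in range but uncovered
      simp only [sweepA, if_pos hgap]
      constructor
      · intro h; simp at h
      · intro hcov
        exfalso
        have hx : leE (r + 1) chi = true := by
          have h1 := hrel (lo, hi) (by simp)
          rw [leE_iff] at h1 ⊢
          calc ((r + 1 : Int) : WithTop Int) ≤ (lo : WithTop Int) := by
                exact_mod_cast le_of_lt hgap
            _ ≤ eV chi := h1
        rcases hcov (r + 1) (by omega) hx with ⟨iv, hm, hc1, _⟩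
        rcases List.mem_cons.1 hm with hh | ht
        · rw [hh] at hc1; simp at hc1; omega
        · have := (List.pairwise_cons.1 hsort).1 iv ht
          simp only at this hc1
          omega
    · simp only [sweepA, if_neg hgap]
      cases hi with
      | none =>
        -- INF interval: break, verdict True; the head covers every x > r
        simp only
        constructor
        · intro _ x hx _
          refine ⟨(lo, none), by simp, ?_, rfl⟩
          show lo ≤ x
          omega
        · intro _; trivial
      | some h =>
        have ihr := ih (max r h) (List.pairwise_cons.1 hsort).2
          (fun iv hm => hrel iv (List.mem_cons_of_mem _ hm))
        simp only
        rw [ihr]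
        constructor
        · intro hcov x hx hxc
          by_cases hxh : x ≤ h
          · refine ⟨(lo, some h), by simp, ?_, ?_⟩
            · show lo ≤ x; omega
            · simp [leE]; omega
          · rcases hcov x (max_lt_iff.2 ⟨hx, by omega⟩) hxc with ⟨iv, hm, hcv⟩
            exact ⟨iv, List.mem_cons_of_mem _ hm, hcv⟩
        · intro hcov x hx hxc
          have hx1 : r < x := lt_of_le_of_lt (le_max_left r h) hx
          have hx2 : h < x := lt_of_le_of_lt (le_max_right r h) hx
          rcases hcov x hx1 hxc with ⟨iv, hm, hcv⟩
          rcases List.mem_cons.1 hm with hh | ht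
          · exfalso
            rw [hh] at hcv
            rcases hcv with ⟨_, hle⟩
            simp only [leE, decide_eq_true_eq] at hle
            omega
          · exact ⟨iv, ht, hcv⟩

-- B's greedy loop decides exactly the same coverage predicate
theorem greedyB_iff (chi : Option Int) :
    ∀ (n : Nat) (s : List (Int × Option Int)) (r : Int), s.length ≤ n →
      (greedyB chi s r = true ↔ coversFrom s r chi) := by
  intro n
  induction n with
  | zero =>
    intro s r hlen
    have hs : s = [] := List.eq_nil_of_length_eq_zero (Nat.le_zero.1 hlen)
    subst hs
    rw [greedyB, if_pos rfl, coveredCheck_iff, coversFrom_nil]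
  | succ n ih =>
    intro s r hlen
    by_cases hs : s = []
    · subst hs
      rw [greedyB, if_pos rfl, coveredCheck_iff, coversFrom_nil]
    · rw [greedyB, if_neg hs]
      by_cases hcc : coveredCheck chi r = true
      · rw [if_pos hcc]
        rw [coveredCheck_iff] at hcc
        constructor
        · intro _ x hx hxc; exact (hcc x hx hxc).elim
        · intro _; rfl
      · rw [if_neg hcc]
        have hneed : leE (r + 1) chi = true := by
          cases chi with
          | none => simp [leE]
          | some h =>
            simp only [coveredCheck, decide_eq_true_eq] at hcc
            simp only [leE, decide_eq_true_eq]
            omega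
        split
        · rename_i hel
          constructor
          · intro h; simp at h
          · intro hcov
            exfalso
            rcases hcov (r + 1) (by omega) hneed with ⟨iv, hm, hc1, _⟩
            have hin : iv.2 ∈ (s.filter (fun iv => decide (iv.1 ≤ r + 1))).map Prod.snd :=
              List.mem_map_of_mem (List.mem_filter.2 ⟨hm, by simpa using hc1⟩)
            rw [hel] at hin
            exact List.not_mem_nil hin
        · rename_i e es hel
          rcases foldl_max_spec e es with ⟨hbmem, hbmax⟩
          rw [← hel] at hbmem hbmax
          rcases List.mem_map.1 hbmem with ⟨biv, hbiv, hbsnd⟩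
          rcases List.mem_filter.1 hbiv with ⟨hbrel, hble⟩
          simp only [decide_eq_true_eq] at hble
          split
          · rename_i hbest
            -- best == INF: biv covers everything above r
            rw [hbest] at hbsnd
            constructor
            · intro _ x hx _
              refine ⟨biv, hbrel, by omega, ?_⟩
              rw [hbsnd]
              rfl
            · intro _; rfl
          · rename_i b hbest
            rw [hbest] at hbsnd hbmax
            by_cases hbr : b ≤ r
            · rw [if_pos hbr]
              constructor
              · intro h; simp at h
              · intro hcov
                exfalso
                rcases hcov (r + 1) (by omega) hneed with ⟨iv, hm, hc1, hc2⟩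
                have hin : iv.2 ∈ (s.filter (fun iv => decide (iv.1 ≤ r + 1))).map Prod.snd :=
                  List.mem_map_of_mem (List.mem_filter.2 ⟨hm, by simpa using hc1⟩)
                have hle2 : (x : Int) → leE x iv.2 = true → leE x (some b) = true := by
                  intro x hx
                  rw [leE_iff] at hx ⊢
                  exact le_trans hx (by simpa [hbsnd] using hbmax iv.2 hin)
                have := hle2 (r + 1) hc2
                simp only [leE, decide_eq_true_eq] at this
                omega
            · rw [if_neg hbr]
              have hlen' : (s.filter (fun iv => decide (r + 1 < iv.1))).length ≤ n := by
                have hlt := filter_gt_length_lt (rel := s) (r := r) (by rw [hel]; exact List.cons_ne_nil _ _)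
                omega
              rw [ih _ b hlen']
              constructor
              · intro hcov x hx hxc
                by_cases hxb : x ≤ b
                · refine ⟨biv, hbrel, by omega, ?_⟩
                  rw [hbsnd, leE_iff]
                  simpa [eV] using (by exact_mod_cast hxb : (x : WithTop Int) ≤ (b : WithTop Int))
                · rcases hcov x (by omega) hxc with ⟨iv, hm, hcv⟩
                  exact ⟨iv, List.mem_of_mem_filter hm, hcv⟩
              · intro hcov x hx hxc
                rcases hcov x (by omega) hxc with ⟨iv, hm, hc1, hc2⟩
                refine ⟨iv, List.mem_filter.2 ⟨hm, ?_⟩, hc1, hc2⟩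
                simp only [decide_eq_true_eq]
                by_contra hno
                have hin : iv.2 ∈ (s.filter (fun iv => decide (iv.1 ≤ r + 1))).map Prod.snd :=
                  List.mem_map_of_mem (List.mem_filter.2 ⟨hm, by simp; omega⟩)
                have hx2 : leE x (some b) = true := by
                  rw [leE_iff]
                  exact le_trans (leE_iff.1 hc2) (by simpa [hbsnd] using hbmax iv.2 hin)
                simp only [leE, decide_eq_true_eq] at hx2
                omega

theorem coversFrom_perm {s t : List (Int × Option Int)} (h : s.Perm t) {r : Int} {chi : Option Int} :
    coversFrom s r chi ↔ coversFrom t r chi := by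
  constructor <;> intro hc x hx hxc <;> rcases hc x hx hxc with ⟨iv, hm, hcv⟩
  · exact ⟨iv, h.mem_iff.1 hm, hcv⟩
  · exact ⟨iv, h.mem_iff.2 hm, hcv⟩

theorem main_eq (candidate : List (String × Int)) (prior_conditions : List (List (String × Int))) :
    is_condition_shadowed_py candidate prior_conditions = is_condition_shadowed_py_alt candidate prior_conditions := by
  unfold is_condition_shadowed_py is_condition_shadowed_py_alt
  cases toInterval? candidate with
  | none => rfl
  | some ci =>
    obtain ⟨clo, chi⟩ := ci
    simp only
    set relevant := (prior_conditions.filterMap toInterval?).filter (fun iv => leE iv.1 chi && leE clo iv.2) with hrelevant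
    by_cases hemp : relevant.isEmpty
    · rw [if_pos hemp, if_pos hemp]
    · rw [if_neg hemp, if_neg hemp]
      have hrelcond : ∀ iv ∈ relevant, leE iv.1 chi = true := by
        intro iv hm
        have := List.of_mem_filter hm
        rw [Bool.and_eq_true] at this
        exact this.1
      have hsp : (PySem.List.sorted relevant (fun iv => iv.1) false).Pairwise (fun a b => a.1 ≤ b.1) :=
        PySem.List.sorted_pairwise relevant (fun iv => iv.1)
      have hperm : (PySem.List.sorted relevant (fun iv => iv.1) false).Perm relevant :=
        PySem.List.sorted_perm relevant (fun iv => iv.1) false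
      have hA := sweepA_iff chi (PySem.List.sorted relevant (fun iv => iv.1) false) (clo - 1)
        hsp (fun iv hm => hrelcond iv (hperm.mem_iff.1 hm))
      rw [coversFrom_perm hperm, ← greedyB_iff chi relevant.length relevant (clo - 1) le_rfl] at hA
      cases hg : greedyB chi relevant (clo - 1) with
      | true => exact hA.2 hg
      | false =>
        rw [hg] at hA
        cases hsw : sweepA (PySem.List.sorted relevant (fun iv => iv.1) false) (clo - 1) with
        | none => rfl
        | some o =>
          rw [hsw] at hA
          cases o with
          | none => simpa using hA
          | some c =>
            simp only at hA
            cases chi with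
            | none => rfl
            | some h =>
              simp only [coveredCheck] at hA
              simpa using hA

-- ===== VERDICT (by name: the statement is the Claim_ definition above) =====
theorem is_condition_shadowed_py_spec : Claim_equal_is_condition_shadowed_py := by
  intro candidate prior_conditions _ _
  unfold Spec_is_condition_shadowed_py
  exact main_eq candidate prior_conditions
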